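-- pv_equiv track=rewrite | github.com/hannahta420/hw4 | sorted.py | reverse_sort_dictionary
-- ===== SOURCE A (Python) =====
-- def reverse_sort_dictionary(d1):
--     if (isinstance(d1,dict) != True):
--         raise TypeError
--
--     new_dict = []
--
--     for i in range(len(d1)):
--         name = (list(reversed(sorted(d1.keys()))))[i]
--         number = (list(reversed(sorted(d1.items()))))[i][1][0]
--         some_tuple = (name,number)
--         new_dict.append(some_tuple)
--     return new_dict
-- ===== SOURCE B (Python) =====
-- def reverse_sort_dictionary(d1):
--     if not isinstance(d1, dict):
--         raise TypeError
--     pairs = [(k, v[0]) for k, v in d1.items()]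
--     pairs.sort(key=lambda p: p[0], reverse=True)
--     return pairs
-- ===== Notes on version B (the rewrite author's own statement) =====
-- stated objective: faster
-- what changed: Instead of re-sorting the key list and the item list from scratch on every loop iteration and indexing into them, B builds the (key, value[0]) pair list in one pass and sorts it once by key in descending order.
import Mathlib
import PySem

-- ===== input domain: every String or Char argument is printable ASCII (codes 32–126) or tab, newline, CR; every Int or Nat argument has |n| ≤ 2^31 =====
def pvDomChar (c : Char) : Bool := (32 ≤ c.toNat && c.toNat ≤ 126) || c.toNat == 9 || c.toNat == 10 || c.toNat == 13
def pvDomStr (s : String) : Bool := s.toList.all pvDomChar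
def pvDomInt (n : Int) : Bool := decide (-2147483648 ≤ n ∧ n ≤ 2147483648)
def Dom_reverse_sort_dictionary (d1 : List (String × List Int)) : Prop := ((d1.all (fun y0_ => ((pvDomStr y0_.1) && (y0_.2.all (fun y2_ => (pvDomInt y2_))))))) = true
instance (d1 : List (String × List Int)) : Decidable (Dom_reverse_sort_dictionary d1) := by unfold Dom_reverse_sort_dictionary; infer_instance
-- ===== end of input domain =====

-- B replaces A's per-index re-sorting of keys and items by one pass building the
-- (key, value[0]) pairs followed by a single descending sort (objective: faster).

-- ===== PORT A =====
-- The dict parameter is marshalled as an association list; Python dict semantics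
-- (last duplicate value wins, first insertion position kept) via PySem.Dict.ofList.
def reverse_sort_dictionary (d1 : List (String × List Int)) : List (String × Int) :=
  let d := PySem.Dict.ofList d1
  let new_dict : List (String × Int) := []
  (PySem.List.pyRange 0 (PySem.Dict.size d) 1).foldl (fun new_dict i =>
    -- name = (list(reversed(sorted(d1.keys()))))[i]; i is always in range, so pyGetD is exact
    let name := PySem.List.pyGetD ((PySem.List.sorted (PySem.Dict.keys d) (fun k => k) false).reverse) i ""
    -- number = (list(reversed(sorted(d1.items()))))[i][1][0]; dict keys are distinct, so
    -- Python's tuple comparison on items never reaches the values: sorting by the key is exact.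
    -- The inner [0] raises IndexError on an empty value list — excluded by Pre_.
    let number := PySem.List.pyGetD (PySem.List.pyGetD ((PySem.List.sorted (PySem.Dict.items d) (fun p => p.1) false).reverse) i ("", [])).2 0 0
    let some_tuple := (name, number)
    new_dict ++ [some_tuple]) new_dict

-- ===== PORT B =====
def reverse_sort_dictionary_alt (d1 : List (String × List Int)) : List (String × Int) :=
  -- pairs = [(k, v[0]) for k, v in d1.items()]  (v[0] exact under Pre_)
  let pairs := (PySem.Dict.ofList d1).items.map (fun p => (p.1, PySem.List.pyGetD p.2 0 0))
  -- pairs.sort(key=lambda p: p[0], reverse=True); return pairs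
  PySem.List.sorted pairs (fun p => p.1) true

-- ===== PRECONDITION & SPEC =====
-- Pre_ excludes dicts with an empty-list value, on which A raises IndexError at v[0] (B raises too).
def Pre_reverse_sort_dictionary (d1 : List (String × List Int)) : Prop :=
  ∀ v ∈ (PySem.Dict.ofList d1).values, v ≠ []
instance (d1 : List (String × List Int)) : Decidable (Pre_reverse_sort_dictionary d1) := by unfold Pre_reverse_sort_dictionary; infer_instance
def pvWitness_reverse_sort_dictionary : (List (String × List Int)) := [("a", [1]), ("b", [2, 3])]

def Spec_reverse_sort_dictionary (d1 : List (String × List Int)) (out : List (String × Int)) : Prop := out = reverse_sort_dictionary_alt d1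
instance (d1 : List (String × List Int)) (out : List (String × Int)) : Decidable (Spec_reverse_sort_dictionary d1 out) := by unfold Spec_reverse_sort_dictionary; infer_instance

-- ===== CLAIM (what is proved, stated in full; the proofs are below) =====
def Claim_equal_reverse_sort_dictionary : Prop := ∀ (d1 : List (String × List Int)), Dom_reverse_sort_dictionary d1 → Pre_reverse_sort_dictionary d1 → Spec_reverse_sort_dictionary d1 (reverse_sort_dictionary d1)

-- ===== LEMMAS AND PROOFS =====

-- sorted keys = keys of sorted items (keys are distinct)
-- the sorted items are strictly increasing in their keys (keys distinct)
theorem sorted_items_pairwise_lt (its : List (String × List Int))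
    (hnd : (its.map Prod.fst).Nodup) :
    (PySem.List.sorted its (fun p => p.1) false).Pairwise (fun a b => a.1 < b.1) := by
  have hle := PySem.List.sorted_pairwise its (fun p => p.1)
  have hnd' : ((PySem.List.sorted its (fun p => p.1) false).map Prod.fst).Nodup :=
    (((PySem.List.sorted_perm its (fun p => p.1) false).map Prod.fst).nodup_iff).mpr hnd
  have hne : (PySem.List.sorted its (fun p => p.1) false).Pairwise (fun a b => a.1 ≠ b.1) :=
    (List.pairwise_map).mp hnd'
  exact (hle.and hne).imp (fun h => lt_of_le_of_ne h.1 h.2)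

-- sorted keys = keys of sorted items (keys are distinct)
theorem sorted_keys_eq_map_sorted_items (its : List (String × List Int))
    (hnd : (its.map Prod.fst).Nodup) :
    PySem.List.sorted (its.map Prod.fst) (fun k => k) false
      = (PySem.List.sorted its (fun p => p.1) false).map Prod.fst := by
  refine PySem.List.sorted_eq_of_perm_of_pairwise_lt _ _ _
    ((PySem.List.sorted_perm its (fun p => p.1) false).map Prod.fst) ?_
  exact (List.pairwise_map).mpr (sorted_items_pairwise_lt its hnd)

theorem hlen_size (d1 : List (String × List Int)) :
    ((PySem.Dict.ofList d1).size : Int)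
      = (((PySem.List.sorted (PySem.Dict.ofList d1).items (fun p => p.1) false).reverse).length : Int) := by
  simp [PySem.Dict.size, PySem.List.length_sorted]

theorem ports_agree (d1 : List (String × List Int)) :
    reverse_sort_dictionary d1 = reverse_sort_dictionary_alt d1 := by
  unfold reverse_sort_dictionary reverse_sort_dictionary_alt
  set its := (PySem.Dict.ofList d1).items with hits
  have hnd : (its.map Prod.fst).Nodup := PySem.Dict.nodup_keys_ofList d1
  set S := PySem.List.sorted its (fun p => p.1) false with hS
  have hkeys : PySem.Dict.keys (PySem.Dict.ofList d1) = its.map Prod.fst := rfl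
  rw [PySem.List.foldl_append_singleton_eq_map
        (fun i => (PySem.List.pyGetD ((PySem.List.sorted (PySem.Dict.keys (PySem.Dict.ofList d1)) (fun k => k) false).reverse) i "",
                   PySem.List.pyGetD (PySem.List.pyGetD ((PySem.List.sorted its (fun p => p.1) false).reverse) i ("", [])).2 0 0))]
  rw [hkeys, sorted_keys_eq_map_sorted_items its hnd, ← hS, List.nil_append,
      ← List.map_reverse]
  have hfun : (fun i => (PySem.List.pyGetD (List.map Prod.fst S.reverse) i "",
        PySem.List.pyGetD (PySem.List.pyGetD S.reverse i ("", [])).2 0 0))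
      = fun i => (fun p : String × List Int => (p.1, PySem.List.pyGetD p.2 0 0))
          (PySem.List.pyGetD S.reverse i ("", [])) := by
    funext i
    exact Prod.ext (PySem.List.pyGetD_map Prod.fst S.reverse i ("", [])) rfl
  rw [hfun]
  rw [show (fun i => (fun p : String × List Int => (p.1, PySem.List.pyGetD p.2 0 0))
        (PySem.List.pyGetD S.reverse i ("", [])))
      = ((fun p : String × List Int => (p.1, PySem.List.pyGetD p.2 0 0))
          ∘ fun i => PySem.List.pyGetD S.reverse i ("", [])) from rfl]
  rw [← List.map_map, hlen_size d1, PySem.List.map_pyGetD_pyRange_zero']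
  refine (PySem.List.sorted_rev_eq_of_perm_of_pairwise_gt _ _ _ ?_ ?_).symm
  · exact (S.reverse_perm.trans (PySem.List.sorted_perm its (fun p => p.1) false)).map _
  · refine (List.pairwise_map).mpr ?_
    exact (List.pairwise_reverse).mpr (sorted_items_pairwise_lt its hnd)

-- ===== VERDICT (by name: the statement is the Claim_ definition above) =====
theorem reverse_sort_dictionary_spec : Claim_equal_reverse_sort_dictionary := by
  intro d1 _ _
  unfold Spec_reverse_sort_dictionary
  exact ports_agree d1
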